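-- pv_equiv track=rewrite | github.com/animesh-chouhan/interview-prep | binary-search/array/1351.py | pos_zero
-- ===== SOURCE A (Python) =====
-- def pos_zero(nums):
--     l = 0
--     r = len(nums)
--     while l < r:
--         mid = (l + r) // 2
--         if nums[mid] >= 0:
--             l = mid + 1
--         else:
--             r = mid
--
--     return l
-- ===== SOURCE B (Python) =====
-- def pos_zero(nums):
--     if not nums:
--         return 0
--     m = len(nums) // 2
--     if nums[m] >= 0:
--         return m + 1 + pos_zero(nums[m + 1:])
--     return pos_zero(nums[:m])
-- ===== Notes on version B (the rewrite author's own statement) =====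
-- stated objective: alternative
-- what changed: Replaces the iterative l/r two-pointer binary-search loop with a direct divide-and-conquer recursion on list slices (same midpoint rule and >= 0 test, so it visits the same elements and returns the same index).
import Mathlib
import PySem

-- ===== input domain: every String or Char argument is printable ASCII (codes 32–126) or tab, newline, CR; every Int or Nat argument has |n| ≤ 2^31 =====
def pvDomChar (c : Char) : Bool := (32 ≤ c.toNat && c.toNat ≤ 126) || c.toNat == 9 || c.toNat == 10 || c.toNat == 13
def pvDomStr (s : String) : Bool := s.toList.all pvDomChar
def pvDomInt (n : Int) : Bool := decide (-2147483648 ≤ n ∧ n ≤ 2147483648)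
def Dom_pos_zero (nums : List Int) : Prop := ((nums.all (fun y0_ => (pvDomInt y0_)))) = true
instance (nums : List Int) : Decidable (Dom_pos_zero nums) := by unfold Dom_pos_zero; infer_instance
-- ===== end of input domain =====

-- B replaces A's iterative two-pointer binary-search loop by a direct recursion on list
-- slices (same midpoint rule, same test), a simpler divide-and-conquer decomposition.

-- ===== PORT A =====
-- while-loop of A as a fuel recursion over the loop state (l, r); fuel len+1 bounds the
-- iteration count since r - l strictly decreases. The `none` branch is unreachable from
-- pos_zero (0 ≤ l ≤ mid < r ≤ len keeps the index in range).
def posZeroLoop (fuel : Nat) (nums : List Int) (l r : Int) : Int :=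
  match fuel with
  | 0 => l
  | .succ fuel =>
    if l < r then
      let mid := PySem.Int.floordiv (l + r) 2
      match PySem.List.pyGet? nums mid with
      | some v =>
        if v ≥ 0 then posZeroLoop fuel nums (mid + 1) r
        else posZeroLoop fuel nums l mid
      | none => l
    else l

def pos_zero (nums : List Int) : Int :=
  posZeroLoop (nums.length + 1) nums 0 (nums.length : Int)

-- ===== PORT B =====
-- direct transliteration of Source B: recursion on the slices nums[m+1:] / nums[:m].
-- The `none` branch is unreachable (0 ≤ m < len for a nonempty list).
def pos_zero_alt (nums : List Int) : Int :=
  if nums.isEmpty then 0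
  else
    let m : Int := PySem.Int.floordiv (nums.length : Int) 2
    match PySem.List.pyGet? nums m with
    | some v =>
      if v ≥ 0 then m + 1 + pos_zero_alt (PySem.List.slice nums (some (m + 1)) none)
      else pos_zero_alt (PySem.List.slice nums none (some m))
    | none => 0
termination_by nums.length
decreasing_by
  · have hm : PySem.Int.floordiv (nums.length : Int) 2 = ((nums.length / 2 : Nat) : Int) :=
      (by exact_mod_cast PySem.Int.floordiv_natCast nums.length 2)
    have hne : nums ≠ [] := by simpa [List.isEmpty_iff] using (by assumption : ¬ nums.isEmpty = true)
    rw [hm]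
    have : PySem.List.slice nums (some (((nums.length / 2 : Nat) : Int) + 1)) none
        = nums.drop (nums.length / 2 + 1) := by
      have := PySem.List.slice_from_natCast nums (nums.length / 2 + 1)
      simpa [Nat.cast_add] using this
    rw [this]
    have hlen : 0 < nums.length := List.length_pos_iff.mpr hne
    simp [List.length_drop]; omega
  · have hm : PySem.Int.floordiv (nums.length : Int) 2 = ((nums.length / 2 : Nat) : Int) :=
      (by exact_mod_cast PySem.Int.floordiv_natCast nums.length 2)
    have hne : nums ≠ [] := by simpa [List.isEmpty_iff] using (by assumption : ¬ nums.isEmpty = true)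
    rw [hm, PySem.List.slice_to_natCast]
    have hlen : 0 < nums.length := List.length_pos_iff.mpr hne
    simp [List.length_take]; omega

-- ===== PRECONDITION & SPEC =====
def Spec_pos_zero (nums : List Int) (out : Int) : Prop := out = pos_zero_alt nums
instance (nums : List Int) (out : Int) : Decidable (Spec_pos_zero nums out) := by unfold Spec_pos_zero; infer_instance

-- ===== CLAIM (what is proved, stated in full; the proofs are below) =====
def Claim_equal_pos_zero : Prop := ∀ (nums : List Int), Dom_pos_zero nums → Spec_pos_zero nums (pos_zero nums)

-- ===== LEMMAS AND PROOFS =====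

-- A's loop on the window [l, r) equals l plus B's recursion on the slice nums[l:r].
lemma posZeroLoop_eq_alt (fuel : Nat) (nums : List Int) :
    ∀ (l r : Nat), l ≤ r → r ≤ nums.length → r - l < fuel →
      posZeroLoop fuel nums (l : Int) (r : Int)
        = (l : Int) + pos_zero_alt ((nums.drop l).take (r - l)) := by
  induction fuel with
  | zero => intro l r _ _ hf; omega
  | succ fuel ih =>
    intro l r hlr hrn hf
    by_cases hlt : l < r
    · -- one loop iteration
      have hMlt : (l + r) / 2 < r := by omega
      have hMge : l ≤ (l + r) / 2 := by omega
      have hmid : PySem.Int.floordiv ((l : Int) + (r : Int)) 2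
          = (((l + r) / 2 : Nat) : Int) := by
        rw [show (l : Int) + (r : Int) = ((l + r : Nat) : Int) by push_cast; ring]
        exact_mod_cast PySem.Int.floordiv_natCast (l + r) 2
      have hMlen : (l + r) / 2 < nums.length := by omega
      have hget : PySem.List.pyGet? nums (((l + r) / 2 : Nat) : Int)
          = some nums[(l + r) / 2] := PySem.List.pyGet?_ofNat nums _ hMlen
      -- the slice B recurses on
      set xs := (nums.drop l).take (r - l) with hxs
      have hxlen : xs.length = r - l := by
        simp [hxs, List.length_take, List.length_drop]; omega
      have hxne : ¬ xs.isEmpty := by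
        simp [List.isEmpty_iff, ← List.length_eq_zero_iff, hxlen]; omega
      have hxm : PySem.Int.floordiv ((xs.length : Int)) 2
          = (((r - l) / 2 : Nat) : Int) := by
        rw [hxlen]; exact_mod_cast PySem.Int.floordiv_natCast (r - l) 2
      have hhalf : (r - l) / 2 < xs.length := by rw [hxlen]; omega
      have hxget : PySem.List.pyGet? xs (((r - l) / 2 : Nat) : Int)
          = some xs[(r - l) / 2] := PySem.List.pyGet?_ofNat xs _ hhalf
      have hsame : xs[(r - l) / 2]'hhalf = nums[(l + r) / 2]'hMlen := by
        simp only [hxs, List.getElem_take, List.getElem_drop]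
        congr 1; omega
      -- unfold one step of the loop and one step of alt
      rw [posZeroLoop]
      rw [if_pos (by exact_mod_cast hlt)]
      conv_rhs => rw [pos_zero_alt]
      rw [if_neg hxne]
      simp only [hmid, hget, hxm, hxget, hsame]
      by_cases hv : nums[(l + r) / 2]'hMlen ≥ 0
      · rw [if_pos hv, if_pos hv]
        have hc : (((l + r) / 2 : Nat) : Int) + 1 = (((l + r) / 2 + 1 : Nat) : Int) := by
          push_cast; ring
        rw [hc, ih ((l + r) / 2 + 1) r (by omega) hrn (by omega)]
        have hslice : PySem.List.slice xs (some ((((r - l) / 2 : Nat) : Int) + 1)) none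
            = (nums.drop ((l + r) / 2 + 1)).take (r - ((l + r) / 2 + 1)) := by
          have h1 : ((((r - l) / 2 : Nat) : Int) + 1) = (((r - l) / 2 + 1 : Nat) : Int) := by
            push_cast; ring
          rw [h1, PySem.List.slice_from_natCast, hxs, List.drop_take, List.drop_drop]
          congr 1
          · omega
          · congr 1; omega
        rw [hslice, show ((l + r) / 2 + 1 : Nat) = l + ((r - l) / 2 + 1) from by omega]
        push_cast; ring
      · rw [if_neg hv, if_neg hv]
        rw [ih l ((l + r) / 2) hMge (by omega) (by omega)]
        have hslice : PySem.List.slice xs none (some (((r - l) / 2 : Nat) : Int))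
            = (nums.drop l).take ((l + r) / 2 - l) := by
          rw [PySem.List.slice_to_natCast, hxs, List.take_take]
          congr 1; omega
        rw [hslice]
    · -- l = r: loop exits, slice is empty
      have hlr' : l = r := by omega
      rw [posZeroLoop, if_neg (by exact_mod_cast hlt)]
      subst hlr'
      simp [pos_zero_alt]

-- ===== VERDICT (by name: the statement is the Claim_ definition above) =====
theorem pos_zero_spec : Claim_equal_pos_zero := by
  intro nums _
  unfold Spec_pos_zero pos_zero
  rw [show (0 : Int) = ((0 : Nat) : Int) by norm_num]
  rw [posZeroLoop_eq_alt (nums.length + 1) nums 0 nums.length (by omega) le_rfl (by omega)]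
  simp
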